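-- pv_equiv track=rewrite | github.com/HyungJiny/AlgorithmStudy | baekjoon/1011.py | operate_count
-- ===== SOURCE A (Python) =====
-- def operate_count(x, y):
--     # 단계의 2배만큼 거리가 대칭을 이루며 커짐을 이용
--     distance = y-x
--     step = 1
--     while distance > step*2:
--         distance -= step*2
--         step += 1
--     if distance > step: return step*2
--     else: return step*2-1
-- ===== SOURCE B (Python) =====
-- def _isqrt(n):
--     # recursive integer square root: isqrt(n) from isqrt(n // 4)
--     if n < 2:
--         return n
--     r = 2 * _isqrt(n // 4)
--     return r + 1 if (r + 1) * (r + 1) <= n else r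
--
-- def operate_count(x, y):
--     d = y - x
--     if d <= 1:
--         return 1
--     n = _isqrt(d)
--     if d <= n * n:
--         return 2 * n - 1
--     if d <= n * n + n:
--         return 2 * n
--     return 2 * n + 1
-- ===== Notes on version B (the rewrite author's own statement) =====
-- stated objective: alternative
-- what changed: Replaced the iterated subtraction loop over steps by a closed form: a recursive integer square root of the distance plus direct remainder comparisons.
import Mathlib
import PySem

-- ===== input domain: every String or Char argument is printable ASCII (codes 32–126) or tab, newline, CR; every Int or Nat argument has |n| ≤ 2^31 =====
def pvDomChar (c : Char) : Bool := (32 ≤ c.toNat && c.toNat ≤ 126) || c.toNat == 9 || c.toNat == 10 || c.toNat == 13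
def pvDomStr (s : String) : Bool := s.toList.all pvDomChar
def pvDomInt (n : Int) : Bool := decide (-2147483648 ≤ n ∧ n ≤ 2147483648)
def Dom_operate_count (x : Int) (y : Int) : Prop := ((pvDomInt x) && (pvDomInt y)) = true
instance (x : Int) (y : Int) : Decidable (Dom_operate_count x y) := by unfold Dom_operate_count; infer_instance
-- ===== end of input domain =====

-- B replaces A's step-by-step subtraction loop by a closed form built on a recursive
-- integer square root of the distance; return values are proved identical on all inputs.

-- ===== PORT A =====
-- A's while-loop; the '1 ≤ step' conjunct is a totality guard only (the loop is
-- always entered with step = 1 and step only increases).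
def opLoopA (distance : Int) (step : Int) : Int :=
  if h : 1 ≤ step ∧ step * 2 < distance then
    opLoopA (distance - step * 2) (step + 1)
  else if step < distance then step * 2 else step * 2 - 1
termination_by distance.toNat
decreasing_by omega

def operate_count (x : Int) (y : Int) : Int :=
  opLoopA (y - x) 1

-- ===== PORT B =====
-- port of Source B's recursive _isqrt
def isqrtB (n : Int) : Int :=
  if h : n < 2 then n
  else
    let r := 2 * isqrtB (PySem.Int.floordiv n 4)
    if (r + 1) * (r + 1) ≤ n then r + 1 else r
termination_by n.toNat
decreasing_by
  rw [PySem.Int.floordiv_eq_ediv_of_pos (by omega : (0:Int) < 4)]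
  omega

def operate_count_alt (x : Int) (y : Int) : Int :=
  let d := y - x
  if d ≤ 1 then 1
  else
    let n := isqrtB d
    if d ≤ n * n then 2 * n - 1
    else if d ≤ n * n + n then 2 * n
    else 2 * n + 1

-- ===== PRECONDITION & SPEC =====
def Spec_operate_count (x : Int) (y : Int) (out : Int) : Prop := out = operate_count_alt x y
instance (x : Int) (y : Int) (out : Int) : Decidable (Spec_operate_count x y out) := by unfold Spec_operate_count; infer_instance

-- ===== CLAIM (what is proved, stated in full; the proofs are below) =====
def Claim_equal_operate_count : Prop := ∀ (x : Int) (y : Int), Dom_operate_count x y → Spec_operate_count x y (operate_count x y)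

-- ===== LEMMAS AND PROOFS =====

-- isqrtB is the integer square root on nonnegative inputs
theorem isqrtB_spec (k : Nat) : ∀ n : Int, n.toNat = k → 0 ≤ n →
    0 ≤ isqrtB n ∧ isqrtB n * isqrtB n ≤ n ∧ n < (isqrtB n + 1) * (isqrtB n + 1) := by
  induction k using Nat.strong_induction_on with
  | _ k ih =>
    intro n hk hn
    by_cases h : n < 2
    · rw [isqrtB, dif_pos h]
      refine ⟨hn, ?_, ?_⟩ <;> nlinarith
    · have h4 : PySem.Int.floordiv n 4 = n / 4 :=
        PySem.Int.floordiv_eq_ediv_of_pos (by omega : (0:Int) < 4)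
      obtain ⟨hr0, hr1, hr2⟩ :=
        ih (PySem.Int.floordiv n 4).toNat (by rw [h4]; omega)
          (PySem.Int.floordiv n 4) rfl (by rw [h4]; omega)
      set r := isqrtB (PySem.Int.floordiv n 4) with hrdef
      rw [h4] at hr1 hr2
      have hb : 4 * (n / 4) ≤ n ∧ n < 4 * (n / 4) + 4 := by omega
      rw [isqrtB, dif_neg h]
      simp only [← hrdef]
      by_cases hc : (2 * r + 1) * (2 * r + 1) ≤ n
      · rw [if_pos hc]
        refine ⟨by omega, hc, by nlinarith⟩
      · rw [if_neg hc]
        refine ⟨by omega, by nlinarith, by omega⟩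

-- core: A's loop from state (d, s) equals B applied to the total distance d + s*(s-1)
theorem opLoopA_eq (k : Nat) : ∀ (d s : Int), d.toNat = k → 1 ≤ s → 1 ≤ d →
    opLoopA d s = operate_count_alt 0 (d + s * (s - 1)) := by
  induction k using Nat.strong_induction_on with
  | _ k ih =>
    intro d s hk hs hd
    rw [opLoopA]
    by_cases hloop : 1 ≤ s ∧ s * 2 < d
    · rw [dif_pos hloop]
      have hrec := ih (d - s * 2).toNat (by omega) (d - s * 2) (s + 1) rfl (by omega) (by omega)
      rw [hrec]
      congr 1
      ring
    · rw [dif_neg hloop]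
      have hds : d ≤ s * 2 := by omega
      set D := d + s * (s - 1) with hD
      have hD1 : 1 ≤ D := by nlinarith
      by_cases hone : D ≤ 1
      · -- D = 1 forces d = 1, s = 1
        have hs1 : s = 1 := by nlinarith
        have hd1 : d = 1 := by nlinarith
        simp only [operate_count_alt, Int.sub_zero]
        rw [if_pos (by omega : D ≤ 1)]
        omega
      · obtain ⟨hn0, hn1, hn2⟩ := isqrtB_spec D.toNat D rfl (by omega)
        simp only [operate_count_alt, Int.sub_zero]
        rw [if_neg (by omega : ¬ D ≤ 1)]
        set n := isqrtB D with hndef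
        by_cases hcase : s < d
        · -- d ∈ (s, 2s]: D ∈ (s², s²+s], so n = s and answer 2s
          have hgt : s * s < D := by nlinarith
          have hle : D ≤ s * s + s := by nlinarith
          have hns : n = s := by nlinarith
          rw [if_pos hcase, if_neg (by nlinarith), if_pos (by nlinarith)]
          omega
        · -- d ∈ [1, s]: D ∈ (s²-s, s²], answer 2s-1
          have hgt : s * s - s < D := by nlinarith
          have hle : D ≤ s * s := by nlinarith
          rw [if_neg hcase]
          by_cases hn : D ≤ n * n
          · have hns : n = s := by nlinarith
            rw [if_pos hn]; omega
          · have hns : n = s - 1 := by nlinarith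
            rw [if_neg hn, if_neg (by nlinarith)]
            omega

-- operate_count_alt depends only on y - x
theorem alt_shift (x y : Int) : operate_count_alt x y = operate_count_alt 0 (y - x) := by
  simp only [operate_count_alt, Int.sub_zero]

-- ===== VERDICT (by name: the statement is the Claim_ definition above) =====
theorem operate_count_spec : Claim_equal_operate_count := by
  intro x y _
  unfold Spec_operate_count
  rw [alt_shift]
  by_cases hd : 1 ≤ y - x
  · have := opLoopA_eq (y - x).toNat (y - x) 1 rfl (by omega) hd
    simpa [operate_count] using this
  · -- distance ≤ 0 or = 0/negative and = 1 handled: here distance ≤ 0, both return 1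
    rw [operate_count, opLoopA]
    rw [dif_neg (by omega), if_neg (by omega)]
    simp only [operate_count_alt, Int.sub_zero]
    rw [if_pos (by omega)]
    norm_num
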